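-- pv_equiv track=rewrite | github.com/interblink/Bootcamp_Programacion_nivel_Explorador_G29 | Clase 26 de julio del 2024  fabrica.py | primer_repetido
-- ===== SOURCE A (Python) =====
-- def primer_repetido(numeros):
--  vistos = set();
--  segundo_numero_encontrado = len(numeros);
--  resultado = -1;
--  primero_numero_encontrado = {};
--  for i, num in enumerate (numeros):
--   if num in vistos:
--     if i < segundo_numero_encontrado:
--      segundo_numero_encontrado = i;
--      resultado = num;
--   else:
--    vistos.add(num);
--    primero_numero_encontrado[num] = i;
--  return resultado;
-- ===== SOURCE B (Python) =====
-- def primer_repetido(numeros):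
--     # Index phase: map each value to the list of all positions where it occurs.
--     posiciones = {}
--     for i, num in enumerate(numeros):
--         posiciones.setdefault(num, []).append(i)
--     # Select phase: among values occurring at least twice, pick the one whose
--     # second occurrence comes first.
--     resultado = -1
--     mejor = len(numeros)
--     for num, idxs in posiciones.items():
--         if len(idxs) >= 2 and idxs[1] < mejor:
--             resultado = num
--             mejor = idxs[1]
--     return resultado
-- ===== Notes on version B (the rewrite author's own statement) =====
-- stated objective: alternative
-- what changed: Replaces A's single forward scan with a seen-set and running minimum by a two-phase index-then-select algorithm: one pass groups all occurrence positions per value into a dict, a second pass over the dict picks the value with the smallest second-occurrence index.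
import Mathlib
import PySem

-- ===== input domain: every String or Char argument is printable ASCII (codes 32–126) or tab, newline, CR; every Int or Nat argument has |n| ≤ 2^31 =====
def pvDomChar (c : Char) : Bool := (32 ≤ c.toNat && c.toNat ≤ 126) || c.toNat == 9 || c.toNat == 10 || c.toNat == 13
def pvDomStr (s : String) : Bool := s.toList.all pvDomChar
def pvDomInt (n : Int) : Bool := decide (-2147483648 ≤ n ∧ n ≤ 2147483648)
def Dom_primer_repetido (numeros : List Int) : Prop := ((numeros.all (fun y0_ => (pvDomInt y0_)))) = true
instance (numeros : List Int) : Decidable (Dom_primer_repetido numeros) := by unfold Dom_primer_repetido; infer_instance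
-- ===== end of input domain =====

-- B replaces A's single forward scan (seen-set + running minimum) by a two-phase
-- index-then-select algorithm: group all occurrence positions per value, then pick
-- the value with the smallest second-occurrence index (objective: alternative).

-- ===== PORT A =====
-- state = (vistos, segundo_numero_encontrado, resultado, primero_numero_encontrado)
def pvStepA (st : PySem.Set Int × Int × Int × PySem.Dict Int Int) (p : Int × Int) :
    PySem.Set Int × Int × Int × PySem.Dict Int Int :=
  if PySem.Set.contains st.1 p.2 then
    if p.1 < st.2.1 then (st.1, p.1, p.2, st.2.2.2) else st
  else
    (PySem.Set.add st.1 p.2, st.2.1, st.2.2.1, PySem.Dict.insert st.2.2.2 p.2 p.1)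

def primer_repetido (numeros : List Int) : Int :=
  ((PySem.List.enumerate numeros 0).foldl pvStepA
    (PySem.Set.empty, (numeros.length : Int), -1, PySem.Dict.empty)).2.2.1

-- ===== PORT B =====
-- phase 1: posiciones.setdefault(num, []).append(i)  =  modify num [] (· ++ [i])
def pvBuild (numeros : List Int) : PySem.Dict Int (List Int) :=
  (PySem.List.enumerate numeros 0).foldl
    (fun d p => d.modify p.2 [] (fun l => l ++ [p.1])) PySem.Dict.empty

-- phase 2 loop body; state = (resultado, mejor); idxs[1] is guarded by len(idxs) >= 2,
-- so List.getD 1 0 is exact there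
def pvSel (st : Int × Int) (p : Int × List Int) : Int × Int :=
  if 2 ≤ p.2.length ∧ p.2.getD 1 0 < st.2 then (p.1, p.2.getD 1 0) else st

def primer_repetido_alt (numeros : List Int) : Int :=
  ((pvBuild numeros).items.foldl pvSel (-1, (numeros.length : Int))).1

-- ===== PRECONDITION & SPEC =====
def Spec_primer_repetido (numeros : List Int) (out : Int) : Prop := out = primer_repetido_alt numeros
instance (numeros : List Int) (out : Int) : Decidable (Spec_primer_repetido numeros out) := by unfold Spec_primer_repetido; infer_instance

-- ===== CLAIM (what is proved, stated in full; the proofs are below) =====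
def Claim_equal_primer_repetido : Prop := ∀ (numeros : List Int), Dom_primer_repetido numeros → Spec_primer_repetido numeros (primer_repetido numeros)

-- ===== LEMMAS AND PROOFS =====

-- ---- A-side: A equals the canonical "first index whose element already occurred" scan ----
def pvCanon (L : List Int) : Int :=
  (PySem.List.enumerate L 0).foldr
    (fun p acc => if p.2 ∈ PySem.List.slice L none (some p.1) then p.2 else acc) (-1)

-- Once a duplicate was recorded at index s, every later index start ≥ s keeps the result.
theorem pvStuck (t : List Int) : ∀ (start : Int) (seen : PySem.Set Int) (s r : Int)
    (d : PySem.Dict Int Int), s ≤ start →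
    ((PySem.List.enumerate t start).foldl pvStepA (seen, s, r, d)).2.2.1 = r := by
  induction t with
  | nil => intro start seen s r d _; simp [PySem.List.enumerate]
  | cons x t ih =>
    intro start seen s r d hs
    rw [PySem.List.enumerate_cons, List.foldl_cons]
    by_cases hmem : PySem.Set.contains seen x
    · have hnot : ¬ (start < s) := by omega
      simp only [pvStepA, hmem, if_true, hnot, if_false]
      exact ih (start + 1) seen s r d (by omega)
    · simp only [pvStepA, hmem, Bool.false_eq_true, if_false]
      exact ih (start + 1) (PySem.Set.add seen x) s r (PySem.Dict.insert d x start) (by omega)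

-- Main invariant: processing the suffix `rest` after a duplicate-free treatment of the
-- prefix `pre` (so vistos = set(pre), resultado = -1) equals the canonical scan on `rest`.
theorem pvMain (rest : List Int) : ∀ (pre : List Int) (Lnat : Nat)
    (d : PySem.Dict Int Int), pre.length + rest.length ≤ Lnat →
    ((PySem.List.enumerate rest (pre.length : Int)).foldl pvStepA
        (PySem.Set.ofList pre, (Lnat : Int), -1, d)).2.2.1
    = (PySem.List.enumerate rest (pre.length : Int)).foldr
        (fun p acc => if p.2 ∈ PySem.List.slice (pre ++ rest) none (some p.1) then p.2 else acc)
        (-1) := by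
  induction rest with
  | nil => intro pre Lnat d _; simp [PySem.List.enumerate]
  | cons x t ih =>
    intro pre Lnat d hL
    rw [PySem.List.enumerate_cons, List.foldl_cons, List.foldr_cons]
    have hslice : PySem.List.slice (pre ++ x :: t) none (some (pre.length : Int)) = pre := by
      rw [PySem.List.slice_to_natCast]
      exact List.take_left
    by_cases hx : x ∈ pre
    · have hc : PySem.Set.contains (PySem.Set.ofList pre) x = true := by
        simp [PySem.Set.contains_eq_listContains, List.contains_eq_mem, PySem.Set.mem_ofList, hx]
      have hlt : (pre.length : Int) < (Lnat : Int) := by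
        simp at hL ⊢; omega
      simp only [pvStepA, hc, hlt, if_pos]
      rw [pvStuck t ((pre.length : Int) + 1) (PySem.Set.ofList pre) (pre.length : Int) x d
            (by omega)]
      rw [hslice]
      simp [hx]
    · have hc : PySem.Set.contains (PySem.Set.ofList pre) x = false := by
        simp [PySem.Set.contains_eq_listContains, List.contains_eq_mem, PySem.Set.mem_ofList, hx]
      simp only [pvStepA, hc, Bool.false_eq_true, if_false]
      have hadd : PySem.Set.add (PySem.Set.ofList pre) x = PySem.Set.ofList (pre ++ [x]) := by
        rw [PySem.Set.ofList_eq_foldl, PySem.Set.ofList_eq_foldl, List.foldl_append]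
        rfl
      have hlen : ((pre.length : Int) + 1) = ((pre ++ [x]).length : Int) := by
        simp
      rw [hadd, hlen, ih (pre ++ [x]) Lnat (PySem.Dict.insert d x (pre.length : Int))
            (by simp at hL ⊢; omega)]
      rw [hslice]
      simp only [hx, if_false]
      have : pre ++ x :: t = (pre ++ [x]) ++ t := by simp
      rw [this]

theorem pvA_canon (L : List Int) : primer_repetido L = pvCanon L := by
  unfold primer_repetido pvCanon
  have h := pvMain L [] L.length PySem.Dict.empty (by simp)
  simpa [PySem.Set.ofList] using h

-- ---- B-side: the entries of the built dict ----
def pvIdx (L : List Int) (v : Int) : List Int :=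
  (((PySem.List.enumerate L 0).map (fun p => (p.2, p.1))).filter (fun p => p.1 == v)).map
    (fun p => p.2)

def pvEnt (L : List Int) : List (Int × List Int) :=
  (PySem.Set.ofList L).map (fun v => (v, pvIdx L v))

theorem pvKeys (L : List Int) : (pvBuild L).keys = PySem.Set.ofList L := by
  unfold pvBuild
  rw [PySem.Dict.keys_foldl_modify_key (PySem.List.enumerate L 0) (fun p => p.2) []
        (fun _ p => (fun l => l ++ [p.1])) PySem.Dict.empty]
  rw [PySem.List.map_snd_enumerate, PySem.Set.ofList_eq_foldl]
  rfl

theorem pvGetD (L : List Int) (v : Int) : (pvBuild L).getD v [] = pvIdx L v := by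
  unfold pvBuild pvIdx
  rw [show (PySem.List.enumerate L 0).foldl
        (fun d p => d.modify p.2 [] (fun l => l ++ [p.1])) PySem.Dict.empty
      = ((PySem.List.enumerate L 0).map (fun p => (p.2, p.1))).foldl
        (fun d p => d.modify p.1 [] (fun l => l ++ [p.2])) PySem.Dict.empty from by
    rw [List.foldl_map]]
  rw [PySem.Dict.getD_foldl_modify_append]
  simp

theorem pvItems (L : List Int) : (pvBuild L).items = pvEnt L := by
  have hnd : (pvBuild L).keys.Nodup := by rw [pvKeys]; exact PySem.Set.nodup_ofList L
  rw [PySem.Dict.items_eq_map_keys (pvBuild L) hnd [], pvKeys]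
  exact List.map_congr_left (fun v _ => by rw [pvGetD])

theorem pvAlt_ent (L : List Int) :
    primer_repetido_alt L = ((pvEnt L).foldl pvSel (-1, (L.length : Int))).1 := by
  unfold primer_repetido_alt
  rw [pvItems]

theorem pvIdx_append (L : List Int) (x v : Int) :
    pvIdx (L ++ [x]) v = pvIdx L v ++ (if x = v then [(L.length : Int)] else []) := by
  unfold pvIdx
  rw [PySem.List.enumerate_append]
  by_cases hv : x = v <;>
    simp [PySem.List.enumerate_cons, PySem.List.enumerate_nil, hv]

theorem pvIdx_len (L : List Int) (v : Int) : (pvIdx L v).length = L.count v := by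
  unfold pvIdx
  rw [List.length_map, ← List.countP_eq_length_filter, List.countP_map]
  rw [show ((fun (p : Int × Int) => p.1 == v) ∘ (fun (p : Int × Int) => (p.2, p.1)))
      = (fun (p : Int × Int) => p.2 == v) from rfl]
  rw [show (fun (p : Int × Int) => p.2 == v) = ((fun i => i == v) ∘ Prod.snd) from rfl]
  rw [← List.countP_map, PySem.List.map_snd_enumerate]
  rfl

theorem pvIdx_lt (L : List Int) (v : Int) : ∀ i ∈ pvIdx L v, i < (L.length : Int) := by
  unfold pvIdx
  intro i hi
  simp only [List.mem_map, List.mem_filter] at hi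
  obtain ⟨p, ⟨⟨q, hq, rfl⟩, _⟩, rfl⟩ := hi
  rw [PySem.List.mem_enumerate_iff] at hq
  obtain ⟨k, hk, rfl⟩ := hq
  simp; omega

theorem pvEntBound (L : List Int) :
    ∀ p ∈ pvEnt L, 2 ≤ p.2.length → p.2.getD 1 0 < (L.length : Int) := by
  intro p hp h2
  obtain ⟨v, _, rfl⟩ := List.mem_map.mp hp
  have h1 : 1 < (pvIdx L v).length := by simpa using h2
  rw [List.getD_eq_getElem _ _ h1]
  exact pvIdx_lt L v _ (List.getElem_mem h1)

theorem pvNodupLen (L : List Int) (h : L.Nodup) : ∀ p ∈ pvEnt L, p.2.length < 2 := by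
  intro p hp
  obtain ⟨v, _, rfl⟩ := List.mem_map.mp hp
  have := List.nodup_iff_count_le_one.mp h v
  simp only [pvIdx_len]
  omega

-- ---- generic facts about the select fold ----
theorem pvMono (es : List (Int × List Int)) : ∀ st : Int × Int, (es.foldl pvSel st).2 ≤ st.2 := by
  induction es with
  | nil => intro st; simp
  | cons p es ih =>
    intro st
    rw [List.foldl_cons]
    by_cases hc : 2 ≤ p.2.length ∧ p.2.getD 1 0 < st.2
    · calc (es.foldl pvSel (pvSel st p)).2 ≤ (pvSel st p).2 := ih _
        _ ≤ st.2 := by unfold pvSel; rw [if_pos hc]; exact le_of_lt hc.2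
    · rw [show pvSel st p = st from by unfold pvSel; rw [if_neg hc]]
      exact ih st

theorem pvPair (n : Int) (es : List (Int × List Int)) :
    (∀ p ∈ es, 2 ≤ p.2.length → p.2.getD 1 0 < n) →
    ∀ m1 m2 : Int, n ≤ m1 → n ≤ m2 →
    ((∀ p ∈ es, p.2.length < 2) ∧ es.foldl pvSel (-1, m1) = (-1, m1) ∧
        es.foldl pvSel (-1, m2) = (-1, m2))
    ∨ (es.foldl pvSel (-1, m1) = es.foldl pvSel (-1, m2) ∧
        (es.foldl pvSel (-1, m1)).2 < n ∧ (∃ p ∈ es, 2 ≤ p.2.length)) := by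
  induction es with
  | nil => intro _ m1 m2 _ _; left; simp
  | cons p es ih =>
    intro hb m1 m2 h1 h2
    rw [List.foldl_cons, List.foldl_cons]
    by_cases hq : 2 ≤ p.2.length
    · have hs : p.2.getD 1 0 < n := hb p (by simp) hq
      have e1 : pvSel (-1, m1) p = (p.1, p.2.getD 1 0) := by
        unfold pvSel; rw [if_pos ⟨hq, by omega⟩]
      have e2 : pvSel (-1, m2) p = (p.1, p.2.getD 1 0) := by
        unfold pvSel; rw [if_pos ⟨hq, by omega⟩]
      right
      refine ⟨by rw [e1, e2], ?_, ⟨p, by simp, hq⟩⟩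
      calc (es.foldl pvSel (pvSel (-1, m1) p)).2 ≤ (pvSel (-1, m1) p).2 := pvMono es _
        _ < n := by rw [e1]; exact hs
    · have e1 : pvSel (-1, m1) p = (-1, m1) := by
        unfold pvSel; rw [if_neg (fun h => hq h.1)]
      have e2 : pvSel (-1, m2) p = (-1, m2) := by
        unfold pvSel; rw [if_neg (fun h => hq h.1)]
      rw [e1, e2]
      rcases ih (fun q hq' h => hb q (by simp [hq']) h) m1 m2 h1 h2 with ⟨ha, hb1, hb2⟩ | ⟨heq, hlt, hex⟩
      · left
        exact ⟨fun q hq' => by rcases List.mem_cons.mp hq' with rfl | hq'' ; omega; exact ha q hq'', hb1, hb2⟩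
      · right
        exact ⟨heq, hlt, hex.imp (fun q ⟨hq', h⟩ => ⟨by simp [hq'], h⟩)⟩

theorem pvSameM (es : List (Int × List Int)) : ∀ (r1 r2 m : Int),
    (∃ p ∈ es, 2 ≤ p.2.length ∧ p.2.getD 1 0 < m) →
    es.foldl pvSel (r1, m) = es.foldl pvSel (r2, m) := by
  induction es with
  | nil => intro r1 r2 m h; simp at h
  | cons p es ih =>
    intro r1 r2 m h
    rw [List.foldl_cons, List.foldl_cons]
    by_cases hc : 2 ≤ p.2.length ∧ p.2.getD 1 0 < m
    · have e1 : pvSel (r1, m) p = (p.1, p.2.getD 1 0) := by unfold pvSel; rw [if_pos hc]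
      have e2 : pvSel (r2, m) p = (p.1, p.2.getD 1 0) := by unfold pvSel; rw [if_pos hc]
      rw [e1, e2]
    · have e1 : pvSel (r1, m) p = (r1, m) := by unfold pvSel; rw [if_neg hc]
      have e2 : pvSel (r2, m) p = (r2, m) := by unfold pvSel; rw [if_neg hc]
      rw [e1, e2]
      obtain ⟨q, hq, hql, hqs⟩ := h
      rcases List.mem_cons.mp hq with rfl | hq'
      · exact absurd ⟨hql, hqs⟩ hc
      · exact ih r1 r2 m ⟨q, hq', hql, hqs⟩

theorem pvNoQual (es : List (Int × List Int)) (st : Int × Int)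
    (h : ∀ p ∈ es, p.2.length < 2) : es.foldl pvSel st = st := by
  induction es generalizing st with
  | nil => simp
  | cons p es ih =>
    rw [List.foldl_cons]
    have hnc : ¬ (2 ≤ p.2.length ∧ p.2.getD 1 0 < st.2) := by
      have := h p (by simp); omega
    rw [show pvSel st p = st from by unfold pvSel; rw [if_neg hnc]]
    exact ih st (fun q hq => h q (by simp [hq]))

-- ---- generic foldr facts and duplicate/prefix characterisations ----
theorem pvFoldrCongr {α β : Type} (es : List α) (f g : α → β → β) (i : β)
    (h : ∀ p ∈ es, ∀ acc, f p acc = g p acc) : es.foldr f i = es.foldr g i := by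
  induction es with
  | nil => rfl
  | cons p es ih =>
    rw [List.foldr_cons, List.foldr_cons, ih (fun q hq => h q (by simp [hq])), h p (by simp)]

theorem pvFoldrNone {α : Type} (es : List α) (c : α → Prop) [DecidablePred c] (g : α → Int) (i : Int)
    (h : ∀ p ∈ es, ¬ c p) : es.foldr (fun p acc => if c p then g p else acc) i = i := by
  induction es with
  | nil => rfl
  | cons p es ih =>
    rw [List.foldr_cons, ih (fun q hq => h q (by simp [hq])), if_neg (h p (by simp))]

theorem pvFoldrAny {α : Type} (es : List α) (c : α → Prop) [DecidablePred c] (g : α → Int) (i1 i2 : Int)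
    (h : ∃ p ∈ es, c p) :
    es.foldr (fun p acc => if c p then g p else acc) i1
      = es.foldr (fun p acc => if c p then g p else acc) i2 := by
  induction es with
  | nil => simp at h
  | cons p es ih =>
    rw [List.foldr_cons, List.foldr_cons]
    by_cases hc : c p
    · rw [if_pos hc, if_pos hc]
    · obtain ⟨q, hq, hcq⟩ := h
      rcases List.mem_cons.mp hq with rfl | hq'
      · exact absurd hcq hc
      · rw [if_neg hc, if_neg hc, ih ⟨q, hq', hcq⟩]

theorem pvNodupTake (L : List Int) (h : L.Nodup) (k : Nat) (hk : k < L.length) :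
    L[k] ∉ L.take k := by
  intro hmem
  obtain ⟨i, hi, hie⟩ := List.getElem_of_mem hmem
  have hik : i < k := by simp at hi; omega
  have hil : i < L.length := by omega
  rw [List.getElem_take] at hie
  rw [List.nodup_iff_getElem?_ne_getElem?] at h
  exact h i k hik hk (by rw [List.getElem?_eq_getElem hil, List.getElem?_eq_getElem hk, hie])

theorem pvDupTake (L : List Int) (h : ¬ L.Nodup) :
    ∃ k, ∃ hk : k < L.length, L[k] ∈ L.take k := by
  rw [List.nodup_iff_getElem?_ne_getElem?] at h
  push Not at h
  obtain ⟨i, j, hij, hj, he⟩ := h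
  have hi : i < L.length := by omega
  rw [List.getElem?_eq_getElem hi, List.getElem?_eq_getElem hj] at he
  refine ⟨j, hj, ?_⟩
  have hlen : i < (L.take j).length := by simp; omega
  have hgt := List.getElem_take (xs := L) (j := j) (i := i) (h := hlen)
  rw [← Option.some.inj he, ← hgt]
  exact List.getElem_mem hlen

theorem pvRC (L : List Int) (x : Int) :
    pvCanon (L ++ [x]) =
      if L.Nodup then (if x ∈ L then x else -1) else pvCanon L := by
  unfold pvCanon
  rw [PySem.List.enumerate_append, List.foldr_append]
  have hx1 : PySem.List.enumerate [x] (0 + (L.length : Int)) = [((L.length : Int), x)] := by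
    simp [PySem.List.enumerate_cons, PySem.List.enumerate_nil]
  rw [hx1]
  have hsl : PySem.List.slice (L ++ [x]) none (some ((L.length : Int))) = L := by
    rw [PySem.List.slice_to_natCast]; exact List.take_left
  rw [List.foldr_cons, List.foldr_nil, hsl]
  have hcong : ∀ p ∈ PySem.List.enumerate L 0, ∀ acc : Int,
      (if p.2 ∈ PySem.List.slice (L ++ [x]) none (some p.1) then p.2 else acc)
        = (if p.2 ∈ PySem.List.slice L none (some p.1) then p.2 else acc) := by
    intro p hp acc
    rw [PySem.List.mem_enumerate_iff] at hp
    obtain ⟨k, hk, rfl⟩ := hp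
    have hz : ((0 : Int) + (k : Int)) = ((k : Nat) : Int) := by omega
    rw [hz, PySem.List.slice_to_natCast, PySem.List.slice_to_natCast,
      List.take_append_of_le_length (by omega)]
  rw [pvFoldrCongr _ _ _ _ hcong]
  by_cases hnd : L.Nodup
  · rw [if_pos hnd]
    refine pvFoldrNone _ _ _ _ ?_
    intro p hp
    rw [PySem.List.mem_enumerate_iff] at hp
    obtain ⟨k, hk, rfl⟩ := hp
    have hz : ((0 : Int) + (k : Int)) = ((k : Nat) : Int) := by omega
    rw [hz, PySem.List.slice_to_natCast]
    exact pvNodupTake L hnd k hk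
  · rw [if_neg hnd]
    refine pvFoldrAny _ _ _ _ _ ?_
    obtain ⟨k, hk, hmem⟩ := pvDupTake L hnd
    refine ⟨((k : Int), L[k]), ?_, ?_⟩
    · rw [PySem.List.mem_enumerate_iff]
      exact ⟨k, hk, by simp⟩
    · simpa [PySem.List.slice_to_natCast] using hmem

-- ---- the same recurrence for B ----
theorem pvEntDup (L : List Int) (hex : ∃ p ∈ pvEnt L, 2 ≤ p.2.length) : ¬ L.Nodup := by
  obtain ⟨p, hp, h2⟩ := hex
  obtain ⟨v, _, rfl⟩ := List.mem_map.mp hp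
  intro hnd
  have := List.nodup_iff_count_le_one.mp hnd v
  rw [pvIdx_len] at h2
  omega

theorem pvRB (L : List Int) (x : Int) :
    primer_repetido_alt (L ++ [x]) =
      if L.Nodup then (if x ∈ L then x else -1) else primer_repetido_alt L := by
  rw [pvAlt_ent, pvAlt_ent,
    show (((L ++ [x]).length : Nat) : Int) = (L.length : Int) + 1 by simp]
  by_cases hx : x ∈ L
  · -- x already occurs in L: the set of values is unchanged, x's index list grows by [n]
    have hset : PySem.Set.ofList (L ++ [x]) = PySem.Set.ofList L := by
      rw [PySem.Set.ofList_eq_foldl (L ++ [x]), List.foldl_append, ← PySem.Set.ofList_eq_foldl]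
      show PySem.Set.add (PySem.Set.ofList L) x = _
      simp [PySem.Set.add, PySem.Set.contains_eq_listContains, List.contains_eq_mem,
        PySem.Set.mem_ofList, hx]
    obtain ⟨p1, p2, hsp⟩ := List.append_of_mem ((PySem.Set.mem_ofList L x).mpr hx)
    have hund := PySem.Set.nodup_ofList L
    rw [hsp] at hund
    have hnx1 : x ∉ p1 := by
      simp [List.nodup_append] at hund
      exact fun h => (hund.2.2 x h).1 rfl
    have hnx2 : x ∉ p2 := by
      simp [List.nodup_append, List.nodup_cons] at hund
      exact hund.2.1.1
    have hEnt : pvEnt L = p1.map (fun v => (v, pvIdx L v)) ++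
        (x, pvIdx L x) :: p2.map (fun v => (v, pvIdx L v)) := by
      unfold pvEnt; rw [hsp]; simp
    have hmc : ∀ (q : List Int), x ∉ q →
        q.map (fun v => (v, pvIdx (L ++ [x]) v)) = q.map (fun v => (v, pvIdx L v)) := by
      intro q hq
      refine List.map_congr_left (fun v hv => ?_)
      have hne : ¬ (x = v) := fun e => hq (e ▸ hv)
      simp [pvIdx_append, hne]
    have hEnt' : pvEnt (L ++ [x]) = p1.map (fun v => (v, pvIdx L v)) ++
        (x, pvIdx L x ++ [(L.length : Int)]) :: p2.map (fun v => (v, pvIdx L v)) := by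
      unfold pvEnt; rw [hset, hsp]
      simp only [List.map_append, List.map_cons]
      rw [hmc p1 hnx1, hmc p2 hnx2, pvIdx_append]
      simp
    rw [hEnt, hEnt', List.foldl_append, List.foldl_append, List.foldl_cons, List.foldl_cons]
    have hb1 : ∀ p ∈ p1.map (fun v => (v, pvIdx L v)), 2 ≤ p.2.length →
        p.2.getD 1 0 < (L.length : Int) := by
      intro p hp h2; exact pvEntBound L p (by rw [hEnt]; simp [hp]) h2
    have hlx : (pvIdx L x).length = L.count x := pvIdx_len L x
    have hcx : 0 < L.count x := List.count_pos_iff.mpr hx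
    rcases pvPair (L.length : Int) (p1.map (fun v => (v, pvIdx L v))) hb1
        ((L.length : Int) + 1) (L.length : Int) (by omega) (le_refl _) with
      ⟨hall, h1, h2⟩ | ⟨heq, hlt, hex⟩
    · -- nothing in p1 qualifies
      rw [h1, h2]
      by_cases h2l : 2 ≤ (pvIdx L x).length
      · -- x's entry fires identically in both runs
        have hs : (pvIdx L x).getD 1 0 < (L.length : Int) :=
          pvEntBound L (x, pvIdx L x) (by rw [hEnt]; simp) h2l
        have hkeep : ((pvIdx L x) ++ [(L.length : Int)]).getD 1 0 = (pvIdx L x).getD 1 0 := by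
          rw [List.getD_eq_getElem _ _ (by simp; omega), List.getD_eq_getElem _ _ (by omega)]
          exact List.getElem_append_left (by omega)
        have e1 : pvSel (-1, (L.length : Int) + 1) (x, pvIdx L x ++ [(L.length : Int)])
            = (x, (pvIdx L x).getD 1 0) := by
          unfold pvSel
          rw [if_pos ⟨by simp; omega, by rw [hkeep]; omega⟩, hkeep]
        have e2 : pvSel (-1, (L.length : Int)) (x, pvIdx L x) = (x, (pvIdx L x).getD 1 0) := by
          unfold pvSel
          rw [if_pos ⟨h2l, hs⟩]
        rw [e1, e2]
        have hnd : ¬ L.Nodup := pvEntDup L ⟨(x, pvIdx L x), by rw [hEnt]; simp, h2l⟩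
        rw [if_neg hnd]
      · rcases Nat.lt_or_ge (pvIdx L x).length 1 with h0 | h1l
        · omega
        · -- x occurred exactly once in L: new entry fires at (x, n), old does nothing
          have hone : (pvIdx L x).length = 1 := by omega
          obtain ⟨a, ha⟩ := List.length_eq_one_iff.mp hone
          have e2 : pvSel (-1, (L.length : Int)) (x, pvIdx L x) = (-1, (L.length : Int)) := by
            unfold pvSel; rw [if_neg (fun h => h2l h.1)]
          have e1 : pvSel (-1, (L.length : Int) + 1) (x, pvIdx L x ++ [(L.length : Int)])
              = (x, (L.length : Int)) := by
            rw [ha]; simp [pvSel]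
          rw [e1, e2]
          by_cases hnd : L.Nodup
          · rw [if_pos hnd, if_pos hx]
            rw [pvNoQual _ _ (fun p hp => pvNodupLen L hnd p (by rw [hEnt]; simp [hp]))]
          · rw [if_neg hnd]
            -- some other value v has two occurrences; it must sit in p2
            have hv : ∃ v, 2 ≤ L.count v := by
              by_contra hc
              push Not at hc
              exact hnd (List.nodup_iff_count_le_one.mpr (fun v => by have := hc v; omega))
            obtain ⟨v, hv2⟩ := hv
            have hvx : v ≠ x := fun e => by rw [e] at hv2; omega
            have hvL : v ∈ L := by
              have : 0 < L.count v := by omega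
              exact List.count_pos_iff.mp this
            have hvsp : v ∈ p1 ++ x :: p2 := by
              rw [← hsp]; exact (PySem.Set.mem_ofList L v).mpr hvL
            have hvp2 : v ∈ p2 := by
              rcases List.mem_append.mp hvsp with hvp1 | hvc
              · exfalso
                have := hall (v, pvIdx L v) (List.mem_map_of_mem hvp1)
                rw [pvIdx_len] at this
                omega
              · rcases List.mem_cons.mp hvc with rfl | h
                · exact absurd rfl hvx
                · exact h
            have hwit : ∃ p ∈ p2.map (fun v => (v, pvIdx L v)),
                2 ≤ p.2.length ∧ p.2.getD 1 0 < (L.length : Int) := by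
              refine ⟨(v, pvIdx L v), List.mem_map_of_mem hvp2, ?_, ?_⟩
              · rw [pvIdx_len]; omega
              · refine pvEntBound L (v, pvIdx L v) (by rw [hEnt]; simp [hvp2]) ?_
                rw [pvIdx_len]; omega
            rw [pvSameM _ x (-1) (L.length : Int) hwit]
    · -- something in p1 already fired: both runs are in the same state with mejor < n
      have hnd : ¬ L.Nodup := by
        refine pvEntDup L ?_
        obtain ⟨p, hp, h2⟩ := hex
        exact ⟨p, by rw [hEnt]; simp [hp], h2⟩
      rw [if_neg hnd, heq]
      have hlt' : ((p1.map (fun v => (v, pvIdx L v))).foldl pvSel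
          (-1, (L.length : Int))).2 < (L.length : Int) := by rw [← heq]; exact hlt
      have hsel : ∀ st : Int × Int, st.2 < (L.length : Int) →
          pvSel st (x, pvIdx L x ++ [(L.length : Int)]) = pvSel st (x, pvIdx L x) := by
        intro st hst
        by_cases h2l : 2 ≤ (pvIdx L x).length
        · have hkeep : ((pvIdx L x) ++ [(L.length : Int)]).getD 1 0 = (pvIdx L x).getD 1 0 := by
            rw [List.getD_eq_getElem _ _ (by simp; omega), List.getD_eq_getElem _ _ (by omega)]
            exact List.getElem_append_left (by omega)
          unfold pvSel
          rw [hkeep]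
          have hiff : (2 ≤ ((pvIdx L x) ++ [(L.length : Int)]).length) ↔
              (2 ≤ (pvIdx L x).length) := by
            simp; omega
          rw [if_congr (and_congr_left' hiff) rfl rfl]
        · rcases Nat.lt_or_ge (pvIdx L x).length 1 with h0 | h1l
          · omega
          · have hone : (pvIdx L x).length = 1 := by omega
            obtain ⟨a, ha⟩ := List.length_eq_one_iff.mp hone
            rw [ha]
            unfold pvSel
            rw [if_neg (by simp; omega), if_neg (by simp)]
      rw [hsel _ hlt']
  · -- x is new: its entry is appended at the end with a single index and never fires
    have hset : PySem.Set.ofList (L ++ [x]) = PySem.Set.ofList L ++ [x] := by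
      rw [PySem.Set.ofList_eq_foldl (L ++ [x]), List.foldl_append, ← PySem.Set.ofList_eq_foldl]
      show PySem.Set.add (PySem.Set.ofList L) x = _
      simp [PySem.Set.add, PySem.Set.contains_eq_listContains, List.contains_eq_mem,
        PySem.Set.mem_ofList, hx]
    have hnil : pvIdx L x = [] := by
      have := pvIdx_len L x
      rw [List.count_eq_zero.mpr hx] at this
      exact List.eq_nil_of_length_eq_zero this
    have hEnt' : pvEnt (L ++ [x]) = pvEnt L ++ [(x, [(L.length : Int)])] := by
      unfold pvEnt
      rw [hset, List.map_append]
      congr 1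
      · refine List.map_congr_left (fun v hv => ?_)
        have hne : ¬ (x = v) := fun e => hx (e ▸ (PySem.Set.mem_ofList L v).mp hv)
        simp [pvIdx_append, hne]
      · simp [pvIdx_append, hnil]
    rw [hEnt', List.foldl_append, List.foldl_cons, List.foldl_nil]
    rw [show ∀ st : Int × Int, pvSel st (x, [(L.length : Int)]) = st from fun st => by
      unfold pvSel; rw [if_neg (by simp)]]
    rcases pvPair (L.length : Int) (pvEnt L) (pvEntBound L)
        ((L.length : Int) + 1) (L.length : Int) (by omega) (le_refl _) with
      ⟨hall, h1, h2⟩ | ⟨heq, hlt, hex⟩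
    · rw [h1, h2]
      simp [hx]
    · rw [heq, if_neg (pvEntDup L hex)]

theorem pvBC (L : List Int) : pvCanon L = primer_repetido_alt L := by
  induction L using List.reverseRecOn with
  | nil => decide
  | append_singleton L x ih => rw [pvRB, pvRC, ih]

-- ===== VERDICT (by name: the statement is the Claim_ definition above) =====
theorem primer_repetido_spec : Claim_equal_primer_repetido := by
  intro numeros _
  unfold Spec_primer_repetido
  rw [pvA_canon, pvBC]
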